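-- pv_equiv track=rewrite | github.com/nikolaisoerensen/MapGenerator | core/terrain_generator.py | _lod_level_to_size
-- ===== SOURCE A (Python) =====
-- def _lod_level_to_size(lod_level: int, target_map_size: int) -> int:
--     """
--     Funktionsweise: Konvertiert numerisches LOD-Level zu tatsächlicher Größe
--     Parameter: lod_level (1-7), target_map_size
--     Returns: int - Tatsächliche Größe für dieses LOD-Level
--     """
--     # Basis-Größe: 32 für LOD 1
--     base_size = 32
--
--     # Verdopplung bis target_map_size erreicht
--     current_size = base_size
--     for level in range(2, lod_level + 1):
--         next_size = current_size * 2
--         if next_size <= target_map_size: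
--             current_size = next_size
--         else:
--             # Nächste Verdopplung würde über target_map_size gehen
--             current_size = target_map_size
--             break
--
--     return min(current_size, target_map_size)
-- ===== SOURCE B (Python) =====
-- def _lod_level_to_size(lod_level: int, target_map_size: int) -> int:
--     # Closed form: size doubles from 32 per LOD level, capped at target_map_size.
--     # Useful doublings are bounded by the target's bit length, so cap the
--     # exponent there (beyond it the min is target_map_size anyway).
--     e = min(max(lod_level - 1, 0), max(target_map_size, 0).bit_length())
--     return min(32 * 2 ** e, target_map_size)
-- ===== Notes on version B (the rewrite author's own statement) =====
-- stated objective: simpler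
-- what changed: Replaced the doubling loop with the closed-form expression min(32 * 2 ** max(lod_level - 1, 0), target_map_size).
import Mathlib
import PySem

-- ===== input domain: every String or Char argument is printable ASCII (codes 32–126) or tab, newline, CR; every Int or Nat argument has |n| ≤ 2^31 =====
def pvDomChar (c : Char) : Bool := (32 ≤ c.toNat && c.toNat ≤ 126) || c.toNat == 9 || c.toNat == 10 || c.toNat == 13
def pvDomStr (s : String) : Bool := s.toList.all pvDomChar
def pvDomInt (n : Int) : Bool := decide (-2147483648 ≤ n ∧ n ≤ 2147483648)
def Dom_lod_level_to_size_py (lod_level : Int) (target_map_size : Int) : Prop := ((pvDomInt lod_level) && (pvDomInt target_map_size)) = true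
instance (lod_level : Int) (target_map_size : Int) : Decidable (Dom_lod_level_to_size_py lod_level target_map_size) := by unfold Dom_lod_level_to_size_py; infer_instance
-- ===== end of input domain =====

-- B replaces A's doubling loop with the closed form min(32·2^e, target) where the
-- exponent e = min(max(lod_level-1,0), bit_length(max(target,0))) — simpler, no loop.
-- ===== PORT A =====
-- loop of A: for level in range(2, lod_level+1): double or cap-and-break
def pvLoopA : Nat → Int → Int → Int
  | 0, cur, _ => cur
  | n+1, cur, target =>
    let next := cur * 2
    if next ≤ target then pvLoopA n next target
    else target  -- current_size = target_map_size; break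

def lod_level_to_size_py (lod_level : Int) (target_map_size : Int) : Int :=
  let base_size : Int := 32
  let current_size := pvLoopA (lod_level + 1 - 2).toNat base_size target_map_size
  min current_size target_map_size

-- ===== PORT B =====
-- Python int.bit_length for nonnegative n (exact: 0 for 0, floor(log2 n)+1 otherwise)
def pvBitLength (n : Nat) : Nat := if n = 0 then 0 else Nat.log 2 n + 1

def lod_level_to_size_py_alt (lod_level : Int) (target_map_size : Int) : Int :=
  let e := min (max (lod_level - 1) 0).toNat (pvBitLength (max target_map_size 0).toNat)
  min (32 * 2 ^ e) target_map_size

-- ===== PRECONDITION & SPEC =====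
def Spec_lod_level_to_size_py (lod_level : Int) (target_map_size : Int) (out : Int) : Prop := out = lod_level_to_size_py_alt lod_level target_map_size
instance (lod_level : Int) (target_map_size : Int) (out : Int) : Decidable (Spec_lod_level_to_size_py lod_level target_map_size out) := by unfold Spec_lod_level_to_size_py; infer_instance

-- ===== CLAIM (what is proved, stated in full; the proofs are below) =====
def Claim_equal_lod_level_to_size_py : Prop := ∀ (lod_level : Int) (target_map_size : Int), Dom_lod_level_to_size_py lod_level target_map_size → Spec_lod_level_to_size_py lod_level target_map_size (lod_level_to_size_py lod_level target_map_size)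

-- ===== LEMMAS AND PROOFS =====
theorem pvLoopA_min (n : Nat) : ∀ (cur t : Int), 0 < cur →
    min (pvLoopA n cur t) t = min (cur * 2 ^ n) t := by
  induction n with
  | zero => intro cur t _; simp [pvLoopA]
  | succ n ih =>
    intro cur t hc
    simp only [pvLoopA]
    split_ifs with h
    · rw [ih (cur * 2) t (by positivity)]
      ring_nf
    · have h2 : (1:Int) ≤ 2 ^ n := one_le_pow₀ (by norm_num)
      have : t < cur * 2 ^ (n+1) := by
        calc t < cur * 2 := by omega
        _ ≤ cur * 2 * 2 ^ n := by nlinarith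
        _ = cur * 2 ^ (n+1) := by ring
      omega

-- ===== VERDICT (by name: the statement is the Claim_ definition above) =====
theorem lod_level_to_size_py_spec : Claim_equal_lod_level_to_size_py := by
  intro lod t _
  unfold Spec_lod_level_to_size_py lod_level_to_size_py lod_level_to_size_py_alt
  have he : (max (lod - 1) 0).toNat = (lod + 1 - 2).toNat := by omega
  rw [he]
  rw [pvLoopA_min _ 32 t (by norm_num)]
  -- collapse the bit-length cap on B's exponent
  set e := (lod + 1 - 2).toNat
  set c := pvBitLength (max t 0).toNat with hc
  have ht : t < 32 * 2 ^ c := by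
    by_cases h : t ≤ 0
    · have : (0:Int) < 32 * 2 ^ c := by positivity
      omega
    · push Not at h
      have hn : (max t 0).toNat = t.toNat := by omega
      have hne : t.toNat ≠ 0 := by omega
      have hlt : t.toNat < 2 ^ (Nat.log 2 t.toNat + 1) :=
        Nat.lt_pow_succ_log_self (by norm_num) _
      have : (t.toNat : Int) < 2 ^ (Nat.log 2 t.toNat + 1) := by exact_mod_cast hlt
      have h2 : c = Nat.log 2 t.toNat + 1 := by simp [hc, pvBitLength, hn, hne]
      rw [h2]
      have h32 : (2:Int) ^ (Nat.log 2 t.toNat + 1) ≤ 32 * 2 ^ (Nat.log 2 t.toNat + 1) := by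
        nlinarith [pow_pos (show (0:Int) < 2 by norm_num) (Nat.log 2 t.toNat + 1)]
      omega
  by_cases h : e ≤ c
  · simp [min_eq_left h]
  · push Not at h
    have hle : (2:Int) ^ c ≤ 2 ^ e := by
      exact pow_le_pow_right₀ (by norm_num) h.le
    have : t < 32 * 2 ^ e := by nlinarith
    simp [min_eq_right h.le]
    omega
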